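-- pv_equiv track=rewrite | github.com/amirhossein-moloki/asoud-backend-finial | detailed_endpoint_comparison.py | categorize_endpoints
-- ===== SOURCE A (Python) =====
-- def categorize_endpoints(endpoints):
--     """Categorize endpoints by functionality"""
--     categories = {
--         'auth': [],
--         'user_management': [],
--         'market_management': [],
--         'product_management': [],
--         'order_management': [],
--         'payment': [],
--         'analytics': [],
--         'notification': [],
--         'chat': [],
--         'category': [],
--         'region': [],
--         'discount': [],
--         'reservation': [],
--         'sms': [],
--         'wallet': [],
--         'affiliate': [],
--         'other': []
--     }
--
--     for endpoint in endpoints: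
--         path = endpoint.get('path', '').lower()
--
--         if any(x in path for x in ['pin', 'auth', 'login', 'register']):
--             categories['auth'].append(endpoint)
--         elif 'user' in path and any(x in path for x in ['bank', 'profile']):
--             categories['user_management'].append(endpoint)
--         elif 'market' in path:
--             categories['market_management'].append(endpoint)
--         elif 'product' in path:
--             categories['product_management'].append(endpoint)
--         elif any(x in path for x in ['order', 'cart']):
--             categories['order_management'].append(endpoint)
--         elif any(x in path for x in ['payment', 'wallet']):
--             categories['payment'].append(endpoint)
--         elif 'analytics' in path:
--             categories['analytics'].append(endpoint)
--         elif 'notification' in path: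
--             categories['notification'].append(endpoint)
--         elif 'chat' in path:
--             categories['chat'].append(endpoint)
--         elif 'category' in path:
--             categories['category'].append(endpoint)
--         elif 'region' in path:
--             categories['region'].append(endpoint)
--         elif 'discount' in path:
--             categories['discount'].append(endpoint)
--         elif any(x in path for x in ['reservation', 'reserve']):
--             categories['reservation'].append(endpoint)
--         elif 'sms' in path:
--             categories['sms'].append(endpoint)
--         elif 'wallet' in path:
--             categories['wallet'].append(endpoint)
--         elif 'affiliate' in path:
--             categories['affiliate'].append(endpoint)
--         else:
--             categories['other'].append(endpoint)
--
--     return categories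
-- ===== SOURCE B (Python) =====
-- _KEYS = ['auth', 'user_management', 'market_management', 'product_management',
--          'order_management', 'payment', 'analytics', 'notification', 'chat',
--          'category', 'region', 'discount', 'reservation', 'sms', 'wallet',
--          'affiliate', 'other']
--
--
-- def _classify(path):
--     """First matching category for an already-lowercased path."""
--     if any(x in path for x in ('pin', 'auth', 'login', 'register')):
--         return 'auth'
--     if 'user' in path and ('bank' in path or 'profile' in path):
--         return 'user_management'
--     if 'market' in path:
--         return 'market_management'
--     if 'product' in path:
--         return 'product_management'
--     if 'order' in path or 'cart' in path:
--         return 'order_management'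
--     if 'payment' in path or 'wallet' in path:
--         return 'payment'
--     if 'analytics' in path:
--         return 'analytics'
--     if 'notification' in path:
--         return 'notification'
--     if 'chat' in path:
--         return 'chat'
--     if 'category' in path:
--         return 'category'
--     if 'region' in path:
--         return 'region'
--     if 'discount' in path:
--         return 'discount'
--     if 'reservation' in path or 'reserve' in path:
--         return 'reservation'
--     if 'sms' in path:
--         return 'sms'
--     if 'wallet' in path:
--         return 'wallet'
--     if 'affiliate' in path:
--         return 'affiliate'
--     return 'other'
--
--
-- def categorize_endpoints(endpoints):
--     """Categorize endpoints by functionality"""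
--     return {k: [e for e in endpoints
--                 if _classify(e.get('path', '').lower()) == k]
--             for k in _KEYS}
-- ===== Notes on version B (the rewrite author's own statement) =====
-- stated objective: alternative
-- what changed: A threads a mutable dict through one loop with a 17-way if/elif append chain; B factors the chain into a pure classifier function and builds the result as a comprehension over the fixed key list, collecting each category by filtering the endpoints whose classification equals that key.
import Mathlib
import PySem

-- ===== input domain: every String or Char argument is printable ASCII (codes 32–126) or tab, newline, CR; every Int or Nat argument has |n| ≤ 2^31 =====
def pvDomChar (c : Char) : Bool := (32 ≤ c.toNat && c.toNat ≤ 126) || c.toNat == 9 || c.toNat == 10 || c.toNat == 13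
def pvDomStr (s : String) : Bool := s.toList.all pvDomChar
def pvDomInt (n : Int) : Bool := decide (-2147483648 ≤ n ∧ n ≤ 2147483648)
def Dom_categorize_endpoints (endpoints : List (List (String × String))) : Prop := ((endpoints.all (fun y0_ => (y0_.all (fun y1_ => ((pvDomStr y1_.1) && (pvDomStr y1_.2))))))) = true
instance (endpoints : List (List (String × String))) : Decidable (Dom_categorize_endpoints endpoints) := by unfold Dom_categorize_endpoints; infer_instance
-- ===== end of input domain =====

-- B replaces A's single loop threading a mutable dict through an if/elif append chain by a
-- pure classifier plus a per-key filter over the fixed key list (objective: alternative).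

-- ===== PORT A =====
-- the dict literal seeding the categories
def categorizeSeed : PySem.Dict String (List (List (String × String))) :=
  PySem.Dict.mk [("auth", []), ("user_management", []), ("market_management", []),
    ("product_management", []), ("order_management", []), ("payment", []),
    ("analytics", []), ("notification", []), ("chat", []), ("category", []),
    ("region", []), ("discount", []), ("reservation", []), ("sms", []),
    ("wallet", []), ("affiliate", []), ("other", [])]

-- the loop body: path lookup + the if/elif append chain (categories[k].append(endpoint))
def categorizeStep (cats : PySem.Dict String (List (List (String × String))))
    (endpoint : List (String × String)) : PySem.Dict String (List (List (String × String))) :=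
  let path := PySem.Str.lower ((PySem.Dict.mk endpoint).getD "path" "")
  if ["pin", "auth", "login", "register"].any (fun x => PySem.Str.isIn x path) then
    cats.modify "auth" [] (· ++ [endpoint])
  else if PySem.Str.isIn "user" path && ["bank", "profile"].any (fun x => PySem.Str.isIn x path) then
    cats.modify "user_management" [] (· ++ [endpoint])
  else if PySem.Str.isIn "market" path then
    cats.modify "market_management" [] (· ++ [endpoint])
  else if PySem.Str.isIn "product" path then
    cats.modify "product_management" [] (· ++ [endpoint])
  else if ["order", "cart"].any (fun x => PySem.Str.isIn x path) then
    cats.modify "order_management" [] (· ++ [endpoint])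
  else if ["payment", "wallet"].any (fun x => PySem.Str.isIn x path) then
    cats.modify "payment" [] (· ++ [endpoint])
  else if PySem.Str.isIn "analytics" path then
    cats.modify "analytics" [] (· ++ [endpoint])
  else if PySem.Str.isIn "notification" path then
    cats.modify "notification" [] (· ++ [endpoint])
  else if PySem.Str.isIn "chat" path then
    cats.modify "chat" [] (· ++ [endpoint])
  else if PySem.Str.isIn "category" path then
    cats.modify "category" [] (· ++ [endpoint])
  else if PySem.Str.isIn "region" path then
    cats.modify "region" [] (· ++ [endpoint])
  else if PySem.Str.isIn "discount" path then
    cats.modify "discount" [] (· ++ [endpoint])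
  else if ["reservation", "reserve"].any (fun x => PySem.Str.isIn x path) then
    cats.modify "reservation" [] (· ++ [endpoint])
  else if PySem.Str.isIn "sms" path then
    cats.modify "sms" [] (· ++ [endpoint])
  else if PySem.Str.isIn "wallet" path then
    cats.modify "wallet" [] (· ++ [endpoint])
  else if PySem.Str.isIn "affiliate" path then
    cats.modify "affiliate" [] (· ++ [endpoint])
  else
    cats.modify "other" [] (· ++ [endpoint])

def categorize_endpoints (endpoints : List (List (String × String))) : List (String × List (List (String × String))) :=
  (endpoints.foldl categorizeStep categorizeSeed).items

-- ===== PORT B =====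
def pvKeys : List String :=
  ["auth", "user_management", "market_management", "product_management",
   "order_management", "payment", "analytics", "notification", "chat",
   "category", "region", "discount", "reservation", "sms", "wallet",
   "affiliate", "other"]

def pvClassify (path : String) : String :=
  if ["pin", "auth", "login", "register"].any (fun x => PySem.Str.isIn x path) then "auth"
  else if PySem.Str.isIn "user" path && (PySem.Str.isIn "bank" path || PySem.Str.isIn "profile" path) then "user_management"
  else if PySem.Str.isIn "market" path then "market_management"
  else if PySem.Str.isIn "product" path then "product_management"
  else if PySem.Str.isIn "order" path || PySem.Str.isIn "cart" path then "order_management"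
  else if PySem.Str.isIn "payment" path || PySem.Str.isIn "wallet" path then "payment"
  else if PySem.Str.isIn "analytics" path then "analytics"
  else if PySem.Str.isIn "notification" path then "notification"
  else if PySem.Str.isIn "chat" path then "chat"
  else if PySem.Str.isIn "category" path then "category"
  else if PySem.Str.isIn "region" path then "region"
  else if PySem.Str.isIn "discount" path then "discount"
  else if PySem.Str.isIn "reservation" path || PySem.Str.isIn "reserve" path then "reservation"
  else if PySem.Str.isIn "sms" path then "sms"
  else if PySem.Str.isIn "wallet" path then "wallet"
  else if PySem.Str.isIn "affiliate" path then "affiliate"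
  else "other"

def categorize_endpoints_alt (endpoints : List (List (String × String))) : List (String × List (List (String × String))) :=
  pvKeys.map (fun k =>
    (k, endpoints.filter (fun e =>
          pvClassify (PySem.Str.lower ((PySem.Dict.mk e).getD "path" "")) == k)))

-- ===== PRECONDITION & SPEC =====
def Spec_categorize_endpoints (endpoints : List (List (String × String))) (out : List (String × List (List (String × String)))) : Prop := out = categorize_endpoints_alt endpoints
instance (endpoints : List (List (String × String))) (out : List (String × List (List (String × String)))) : Decidable (Spec_categorize_endpoints endpoints out) := by unfold Spec_categorize_endpoints; infer_instance

-- ===== CLAIM (what is proved, stated in full; the proofs are below) =====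
def Claim_equal_categorize_endpoints : Prop := ∀ (endpoints : List (List (String × String))), Dom_categorize_endpoints endpoints → Spec_categorize_endpoints endpoints (categorize_endpoints endpoints)

-- ===== LEMMAS AND PROOFS =====

-- the key A's loop body appends under, expressed through B's classifier
def pvKeyOf (e : List (String × String)) : String :=
  pvClassify (PySem.Str.lower ((PySem.Dict.mk e).getD "path" ""))

theorem pvMemIte {α : Type} {c : Prop} [Decidable c] {a b : α} {L : List α}
    (ha : a ∈ L) (hb : b ∈ L) : (if c then a else b) ∈ L := by
  split <;> assumption

theorem pvKeyOf_mem (e : List (String × String)) : pvKeyOf e ∈ pvKeys := by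
  unfold pvKeyOf pvClassify
  repeat' apply pvMemIte
  all_goals decide

theorem pvStep_eq (d : PySem.Dict String (List (List (String × String))))
    (e : List (String × String)) :
    categorizeStep d e = d.modify (pvKeyOf e) [] (· ++ [e]) := by
  unfold categorizeStep pvKeyOf pvClassify
  simp only [List.any_cons, List.any_nil, Bool.or_false,
    apply_ite (fun k => d.modify k ([] : List (List (String × String))) (· ++ [e]))]

theorem pvGetD_fold (l : List (List (String × String)))
    (d : PySem.Dict String (List (List (String × String)))) (c : String) :
    (l.foldl (fun d e => d.modify (pvKeyOf e) [] (· ++ [e])) d).getD c []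
      = d.getD c [] ++ l.filter (fun e => pvKeyOf e == c) := by
  induction l generalizing d with
  | nil => simp
  | cons e rest ih =>
    rw [List.foldl_cons, List.filter_cons, ih, PySem.Dict.getD_modify]
    by_cases h : pvKeyOf e = c
    · rw [if_pos h.symm, if_pos (by simp [h]), h,
        List.append_assoc, List.singleton_append]
    · rw [if_neg (fun hc => h hc.symm), if_neg (by simp [h])]

theorem pvKeys_fold (l : List (List (String × String))) :
    (l.foldl (fun d e => d.modify (pvKeyOf e) [] (· ++ [e])) categorizeSeed).keys = pvKeys := by
  have h := PySem.Dict.keys_foldl_modify_key l pvKeyOf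
      ([] : List (List (String × String)))
      (fun _ e => fun v => v ++ [e]) categorizeSeed
  rw [h]
  have hk : categorizeSeed.keys = pvKeys := by decide
  rw [hk, PySem.Set.update_eq_append_filter]
  have hfil : (PySem.Set.ofList (l.map pvKeyOf)).filter
      (fun y => !(PySem.Set.contains pvKeys y)) = [] := by
    rw [List.filter_eq_nil_iff]
    intro y hy
    have hy' : y ∈ l.map pvKeyOf := (PySem.Set.mem_ofList _ _).mp hy
    obtain ⟨e, _, rfl⟩ := List.mem_map.mp hy'
    simp only [(PySem.Set.contains_iff _ _).mpr (pvKeyOf_mem e), Bool.not_true,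
      Bool.false_eq_true, not_false_eq_true]
  rw [hfil, List.append_nil]

theorem pvGetD_of_all_eq {kappa nu : Type} [BEq kappa] (l : List (kappa × nu)) (k : kappa)
    (v0 : nu) (h : ∀ p ∈ l, p.2 = v0) : (PySem.Dict.mk l).getD k v0 = v0 := by
  induction l with
  | nil =>
    rw [PySem.Dict.getD_eq_get?_getD]
    rfl
  | cons p rest ih =>
    rw [PySem.Dict.getD_eq_get?_getD, PySem.Dict.get?_mk_cons]
    split
    · exact h p (List.mem_cons_self)
    · rw [← PySem.Dict.getD_eq_get?_getD]
      exact ih (fun q hq => h q (List.mem_cons_of_mem _ hq))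

theorem pvSeed_getD (k : String) : categorizeSeed.getD k [] = [] := by
  unfold categorizeSeed
  exact pvGetD_of_all_eq _ k [] (by decide)

theorem categorize_endpoints_eq (endpoints : List (List (String × String))) :
    categorize_endpoints endpoints = categorize_endpoints_alt endpoints := by
  unfold categorize_endpoints
  rw [PySem.List.foldl_congr_mem endpoints categorizeStep
        (fun d e => d.modify (pvKeyOf e) [] (· ++ [e])) categorizeSeed
        (fun d e _ => pvStep_eq d e)]
  set F := endpoints.foldl (fun d e => d.modify (pvKeyOf e) [] (· ++ [e])) categorizeSeed with hF
  have hkeys : F.keys = pvKeys := pvKeys_fold endpoints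
  have hnd : F.keys.Nodup := by rw [hkeys]; decide
  rw [PySem.Dict.items_eq_map_keys F hnd [], hkeys]
  unfold categorize_endpoints_alt
  apply List.map_congr_left
  intro k _
  rw [hF, pvGetD_fold, pvSeed_getD, List.nil_append]
  rfl

-- ===== VERDICT (by name: the statement is the Claim_ definition above) =====
theorem categorize_endpoints_spec : Claim_equal_categorize_endpoints := by
  intro endpoints _
  unfold Spec_categorize_endpoints
  exact categorize_endpoints_eq endpoints
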